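-- pv_equiv track=rewrite | github.com/gyli/PyWaffle | pywaffle/waffle.py | _block_arranger
-- ===== SOURCE A (Python) =====
-- from itertools import islice, product
-- from typing import Iterable, Iterator, List, Tuple, Union
--
-- def chunked(iterable: Iterable, step: int) -> List:
--     """
--     Yield successive step-sized chunks from list
--     """
--     iterable = iter(iterable)
--     yield from iter(lambda: list(islice(iterable, step)), [])
--
-- def flip_lines(matrix: Iterable[Tuple[int, int]], base: int) -> Tuple[int, int]:
--     """
--     Given a matrix in a linear array, flip the element order of every odd row
--     """
--     for line_number, line in enumerate(chunked(matrix, base)):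
--         yield from line if line_number % 2 == 0 else line[::-1]
--
-- def _block_arranger(
--     rows: int, columns: int, row_order: int, column_order: int, is_vertical: bool, is_snake: bool
-- ) -> Iterator[Tuple[int, int]]:
--     """
--     Given the size of a matrix and starting point, return how to go through every element in the matrix
--     """
--     if is_vertical:
--         x, x_order, y, y_order = rows, row_order, columns, column_order
--         vertical_order = -1
--     else:
--         x, x_order, y, y_order = columns, column_order, rows, row_order
--         vertical_order = 1
--
--     block_matrix = product(range(x)[::x_order], range(y)[::y_order])
--     line_base = columns if is_vertical else rows
--
--     if is_snake:
--         block_matrix = flip_lines(block_matrix, base=line_base)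
--
--     return (c[::vertical_order] for c in block_matrix)
-- ===== SOURCE B (Python) =====
-- def _block_arranger(rows, columns, row_order, column_order, is_vertical, is_snake):
--     # Closed-form: compute each output cell directly from its position index,
--     # mapping t -> source position in the row-major product via snake arithmetic.
--     if is_vertical:
--         x, xo, y, yo = rows, row_order, columns, column_order
--     else:
--         x, xo, y, yo = columns, column_order, rows, row_order
--
--     def rlen(d, s):
--         return 0 if d <= 0 else (d + abs(s) - 1) // abs(s)
--
--     def relem(d, s, j):
--         return j * s if s > 0 else (d - 1) + j * s
--
--     nx, ny = rlen(x, xo), rlen(y, yo)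
--     n = nx * ny
--     base = columns if is_vertical else rows
--     out = []
--     for t in range(n):
--         p = t
--         if is_snake:
--             c, r = divmod(t, base)
--             if c % 2 == 1:
--                 p = c * base + (min(base, n - c * base) - 1 - r)
--         i, j = divmod(p, ny)
--         coord = (relem(x, xo, i), relem(y, yo, j))
--         out.append((coord[1], coord[0]) if is_vertical else coord)
--     return out
-- ===== Notes on version B (the rewrite author's own statement) =====
-- stated objective: alternative
-- what changed: Replaced the product/chunked/flip_lines stream pipeline with closed-form index arithmetic: each output cell t is computed directly by mapping t through snake div/mod arithmetic to a source position and decoding it into coordinates, with range lengths and elements given by ceiling-division formulas instead of materialised ranges.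
import Mathlib
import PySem

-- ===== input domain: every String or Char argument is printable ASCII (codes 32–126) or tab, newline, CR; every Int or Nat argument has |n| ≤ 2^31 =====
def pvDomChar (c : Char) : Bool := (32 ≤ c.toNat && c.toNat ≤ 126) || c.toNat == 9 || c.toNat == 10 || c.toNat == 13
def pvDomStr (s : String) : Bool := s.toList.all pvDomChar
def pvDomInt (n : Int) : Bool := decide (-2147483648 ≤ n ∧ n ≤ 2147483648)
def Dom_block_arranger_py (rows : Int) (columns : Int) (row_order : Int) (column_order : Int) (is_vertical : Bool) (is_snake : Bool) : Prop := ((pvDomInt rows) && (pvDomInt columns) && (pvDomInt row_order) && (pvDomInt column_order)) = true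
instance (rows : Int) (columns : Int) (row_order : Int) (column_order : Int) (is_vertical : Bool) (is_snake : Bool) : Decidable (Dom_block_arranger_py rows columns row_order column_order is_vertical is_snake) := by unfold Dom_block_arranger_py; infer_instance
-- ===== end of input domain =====

-- B replaces A's product/chunked/flip_lines stream pipeline by closed-form index arithmetic:
-- each output cell is computed directly from its position via snake div/mod arithmetic and
-- ceiling-division range formulas (objective: alternative).

-- ===== PORT A =====
-- shared primitive: Python's  range(x)[::s]  — computed, as CPython does, as the equivalent
-- range: range(0,x,s) for s > 0 and range(x-1,-1,s) for s < 0 (s = 0 raises ValueError → excluded by Pre_)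
def rangeSlice (x s : Int) : List Int :=
  if 0 < s then PySem.List.pyRange 0 x s
  else if s < 0 then PySem.List.pyRange (x - 1) (-1) s
  else []

-- chunked(iterable, step): successive step-sized chunks; step = 0 stops immediately (sentinel []),
-- step < 0 raises in Python (reachable only with is_snake; excluded by Pre_).
-- The Nat argument is fuel only (l.length always suffices); it keeps the recursion structural.
def chunkedAGo {α : Type} (step : Int) : Nat → List α → List (List α)
  | _, [] => []
  | 0, _ :: _ => []
  | n + 1, a :: t =>
    if step < 1 then []
    else ((a :: t).take step.toNat) :: chunkedAGo step n ((a :: t).drop step.toNat)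

def chunkedA {α : Type} (step : Int) (l : List α) : List (List α) :=
  chunkedAGo step l.length l

-- flip_lines(matrix, base): reverse every odd-indexed chunk
def flipLinesA (l : List (Int × Int)) (base : Int) : List (Int × Int) :=
  (PySem.List.enumerate (chunkedA base l)).flatMap
    (fun p => if PySem.Int.mod p.1 2 = 0 then p.2 else p.2.reverse)

def block_arranger_py (rows : Int) (columns : Int) (row_order : Int) (column_order : Int) (is_vertical : Bool) (is_snake : Bool) : List (Int × Int) :=
  let x := if is_vertical then rows else columns
  let x_order := if is_vertical then row_order else column_order
  let y := if is_vertical then columns else rows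
  let y_order := if is_vertical then column_order else row_order
  let xs := rangeSlice x x_order
  let ys := rangeSlice y y_order
  let block_matrix := xs.flatMap (fun a => ys.map (fun b => (a, b)))   -- itertools.product
  let line_base := if is_vertical then columns else rows
  let block_matrix := if is_snake then flipLinesA block_matrix line_base else block_matrix
  -- c[::vertical_order] : identity for 1, tuple swap for -1
  if is_vertical then block_matrix.map (fun c => (c.2, c.1)) else block_matrix

-- ===== PORT B =====
-- rlen(d, s) = len(range(d)[::s]) = ceil(d/|s|)  (0 for empty); relem(d, s, j) = range(d)[::s][j]
def rlenB (d s : Int) : Int := if d ≤ 0 then 0 else PySem.Int.floordiv (d + |s| - 1) |s|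

def relemB (d s j : Int) : Int := if 0 < s then j * s else (d - 1) + j * s

def block_arranger_py_alt (rows : Int) (columns : Int) (row_order : Int) (column_order : Int) (is_vertical : Bool) (is_snake : Bool) : List (Int × Int) :=
  let x := if is_vertical then rows else columns
  let xo := if is_vertical then row_order else column_order
  let y := if is_vertical then columns else rows
  let yo := if is_vertical then column_order else row_order
  let nx := rlenB x xo
  let ny := rlenB y yo
  let n := nx * ny
  let base := if is_vertical then columns else rows
  (PySem.List.pyRange 0 n 1).foldl
    (fun out t =>
      let p :=
        if is_snake then
          let c := PySem.Int.floordiv t base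
          let r := PySem.Int.mod t base
          if PySem.Int.mod c 2 = 1 then c * base + (min base (n - c * base) - 1 - r) else t
        else t
      let i := PySem.Int.floordiv p ny
      let j := PySem.Int.mod p ny
      let coord := (relemB x xo i, relemB y yo j)
      out ++ [if is_vertical then (coord.2, coord.1) else coord])
    []

-- ===== PRECONDITION & SPEC =====
-- Pre_ excludes exactly the inputs where A raises: a zero slice step (ValueError from range(x)[::0]),
-- and is_snake with a negative chunk base (ValueError from islice with a negative count).
def Pre_block_arranger_py (rows : Int) (columns : Int) (row_order : Int) (column_order : Int) (is_vertical : Bool) (is_snake : Bool) : Prop :=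
  row_order ≠ 0 ∧ column_order ≠ 0 ∧
    (is_snake = true → 0 ≤ (if is_vertical then columns else rows))
instance (rows : Int) (columns : Int) (row_order : Int) (column_order : Int) (is_vertical : Bool) (is_snake : Bool) : Decidable (Pre_block_arranger_py rows columns row_order column_order is_vertical is_snake) := by unfold Pre_block_arranger_py; infer_instance

def pvWitness_block_arranger_py : Int × Int × Int × Int × Bool × Bool := (3, 4, 1, -1, true, true)

def Spec_block_arranger_py (rows : Int) (columns : Int) (row_order : Int) (column_order : Int) (is_vertical : Bool) (is_snake : Bool) (out : List (Int × Int)) : Prop := out = block_arranger_py_alt rows columns row_order column_order is_vertical is_snake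
instance (rows : Int) (columns : Int) (row_order : Int) (column_order : Int) (is_vertical : Bool) (is_snake : Bool) (out : List (Int × Int)) : Decidable (Spec_block_arranger_py rows columns row_order column_order is_vertical is_snake out) := by unfold Spec_block_arranger_py; infer_instance

-- ===== CLAIM (what is proved, stated in full; the proofs are below) =====
def Claim_equal_block_arranger_py : Prop := ∀ (rows : Int) (columns : Int) (row_order : Int) (column_order : Int) (is_vertical : Bool) (is_snake : Bool), Dom_block_arranger_py rows columns row_order column_order is_vertical is_snake → Pre_block_arranger_py rows columns row_order column_order is_vertical is_snake → Spec_block_arranger_py rows columns row_order column_order is_vertical is_snake (block_arranger_py rows columns row_order column_order is_vertical is_snake)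

-- ===== LEMMAS AND PROOFS =====

-- source position in the flattened product that the snake traversal reads for output position t
def snakeSrc (bn N t : Nat) : Nat :=
  if (t / bn) % 2 = 0 then t
  else (t / bn) * bn + (min bn (N - (t / bn) * bn) - 1 - t % bn)

lemma mapRange_drop {α : Type} (g : Nat → α) (n m : Nat) :
    ((List.range n).map g).drop m = (List.range (n - m)).map (fun u => g (m + u)) := by
  apply List.ext_getElem
  · simp
  · intro i h1 h2
    simp

lemma mapRange_reverse {α : Type} (g : Nat → α) (m : Nat) :
    ((List.range m).map g).reverse = (List.range m).map (fun u => g (m - 1 - u)) := by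
  apply List.ext_getElem
  · simp
  · intro i h1 h2
    simp at h1
    simp [List.getElem_reverse]

lemma snakeSrc_low {bn N t : Nat} (ht : t < bn) : snakeSrc bn N t = t := by
  unfold snakeSrc
  rw [Nat.div_eq_of_lt ht]
  simp

lemma snakeSrc_mid {bn N u : Nat} (hbn : 1 ≤ bn) (hu : u < bn) :
    snakeSrc bn N (bn + u) = bn + (min bn (N - bn) - 1 - u) := by
  unfold snakeSrc
  have hdiv : (bn + u) / bn = 1 := by
    rw [Nat.add_comm, Nat.add_div_right u (by omega)]
    rw [Nat.div_eq_of_lt hu]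
  have hmod : (bn + u) % bn = u := by
    rw [Nat.add_comm, Nat.add_mod_right, Nat.mod_eq_of_lt hu]
  rw [hdiv, hmod]
  norm_num

lemma snakeSrc_shift {bn N u : Nat} (hbn : 1 ≤ bn) :
    snakeSrc bn N (bn + (bn + u)) = bn + (bn + snakeSrc bn (N - bn - bn) u) := by
  have he : bn + (bn + u) = u + bn * 2 := by omega
  have hdiv : (bn + (bn + u)) / bn = u / bn + 2 := by
    rw [he, Nat.add_mul_div_left u 2 (by omega)]
  have hmod : (bn + (bn + u)) % bn = u % bn := by
    rw [he, Nat.add_mul_mod_self_left]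
  unfold snakeSrc
  rw [hdiv, hmod]
  have hq : (u / bn + 2) * bn = u / bn * bn + (bn + bn) := by ring
  rw [hq]
  have hpar : (u / bn + 2) % 2 = u / bn % 2 := by omega
  rw [hpar]
  split
  · omega
  · have hsub : N - (u / bn * bn + (bn + bn)) = N - bn - bn - u / bn * bn := by omega
    rw [hsub]
    have hmlt : u % bn < bn := Nat.mod_lt _ (by omega)
    omega

-- previous-port helper lemmas for chunkedA / flipLinesA
lemma chunkedAGo_congr {α : Type} (step : Int) :
    ∀ (n m : Nat) (l : List α), l.length ≤ n → l.length ≤ m →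
      chunkedAGo step n l = chunkedAGo step m l := by
  intro n
  induction n with
  | zero =>
    intro m l hn _
    have : l = [] := List.eq_nil_of_length_eq_zero (Nat.le_zero.mp hn)
    subst this
    cases m <;> rfl
  | succ n ih =>
    intro m l hn hm
    rcases l with _ | ⟨a, t⟩
    · cases m <;> rfl
    · rcases m with _ | m
      · simp at hm
      · simp only [chunkedAGo]
        by_cases hst : step < 1
        · rw [if_pos hst, if_pos hst]
        · rw [if_neg hst, if_neg hst]
          congr 1
          exact ih m _ (by simp only [List.length_drop, List.length_cons] at *; omega)
            (by simp only [List.length_drop, List.length_cons] at *; omega)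

lemma chunkedA_nil {α : Type} (b : Int) : chunkedA b ([] : List α) = [] := rfl

lemma chunkedA_cons {α : Type} {b : Int} (hb : 1 ≤ b) {l : List α} (hl : l ≠ []) :
    chunkedA b l = l.take b.toNat :: chunkedA b (l.drop b.toNat) := by
  rcases l with _ | ⟨a, t⟩
  · exact absurd rfl hl
  · show chunkedAGo b ((a :: t).length) (a :: t) = _
    rw [List.length_cons, chunkedAGo, if_neg (not_lt.mpr hb)]
    congr 1
    exact chunkedAGo_congr b t.length ((a :: t).drop b.toNat).length _
      (by simp only [List.length_drop, List.length_cons]; omega) le_rfl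

lemma flipLinesA_nil (b : Int) : flipLinesA [] b = [] := by
  unfold flipLinesA
  rw [chunkedA_nil, PySem.List.enumerate_nil]
  rfl

lemma enumerate_flatMap_parity (cs : List (List (Int × Int))) (s : Int) :
    (PySem.List.enumerate cs (s + 2)).flatMap
        (fun p => if PySem.Int.mod p.1 2 = 0 then p.2 else p.2.reverse) =
      (PySem.List.enumerate cs s).flatMap
        (fun p => if PySem.Int.mod p.1 2 = 0 then p.2 else p.2.reverse) := by
  induction cs generalizing s with
  | nil => rw [PySem.List.enumerate_nil, PySem.List.enumerate_nil]
  | cons c cs ih =>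
    rw [PySem.List.enumerate_cons, PySem.List.enumerate_cons, List.flatMap_cons,
      List.flatMap_cons]
    have hmod : PySem.Int.mod (s + 2) 2 = PySem.Int.mod s 2 := by
      rw [PySem.Int.mod_eq_emod_of_pos (by norm_num), PySem.Int.mod_eq_emod_of_pos (by norm_num)]
      omega
    have e : s + 2 + 1 = s + 1 + 2 := by ring
    rw [e, ih (s + 1)]
    simp only [hmod]

lemma flipLinesA_unfold {b : Int} (hb : 1 ≤ b) (l : List (Int × Int)) :
    flipLinesA l b =
      l.take b.toNat ++ ((l.drop b.toNat).take b.toNat).reverse ++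
        flipLinesA ((l.drop b.toNat).drop b.toNat) b := by
  rcases eq_or_ne l [] with hl | hl
  · subst hl; simp [flipLinesA_nil]
  · rcases eq_or_ne (l.drop b.toNat) [] with h1 | h1
    · conv_lhs => unfold flipLinesA
      rw [chunkedA_cons hb hl, h1, chunkedA_nil, PySem.List.enumerate_cons,
        PySem.List.enumerate_nil, List.drop_nil, flipLinesA_nil]
      simp [PySem.Int.mod]
    · unfold flipLinesA
      rw [chunkedA_cons hb hl, chunkedA_cons hb h1, PySem.List.enumerate_cons,
        PySem.List.enumerate_cons, List.flatMap_cons, List.flatMap_cons]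
      have h02 : (0 : Int) + 1 + 1 = 0 + 2 := by ring
      rw [h02, enumerate_flatMap_parity _ 0]
      simp [List.append_assoc]

-- flipping odd lines of a length-N map over range IS reading positions through snakeSrc
lemma map_snake {bn : Nat} (hbn : 1 ≤ bn) :
    ∀ (N : Nat) (g : Nat → Int × Int),
      flipLinesA ((List.range N).map g) (bn : Int) =
        (List.range N).map (fun t => g (snakeSrc bn N t)) := by
  intro N
  induction N using Nat.strong_induction_on with
  | _ N ih =>
    intro g
    rcases Nat.eq_zero_or_pos N with h0 | hNpos
    · subst h0; simp [flipLinesA_nil]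
    · have hbInt : (1 : Int) ≤ (bn : Int) := by exact_mod_cast hbn
      rw [flipLinesA_unfold hbInt]
      simp only [Int.toNat_natCast]
      set a1 := min bn N with ha1
      set a2 := min bn (N - bn) with ha2
      set a3 := N - bn - bn with ha3
      have hsplit : N = a1 + (a2 + a3) := by omega
      have htake : ((List.range N).map g).take bn = (List.range a1).map g := by
        rw [← List.map_take, List.take_range]
      have hdrop : ((List.range N).map g).drop bn =
          (List.range (N - bn)).map (fun u => g (bn + u)) := mapRange_drop g N bn
      have hmidtake : (((List.range N).map g).drop bn).take bn =
          (List.range a2).map (fun u => g (bn + u)) := by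
        rw [hdrop, ← List.map_take, List.take_range]
      have hrest : (((List.range N).map g).drop bn).drop bn =
          (List.range a3).map (fun u => g (bn + (bn + u))) := by
        rw [hdrop, mapRange_drop]
      rw [htake, hmidtake, hrest, mapRange_reverse, ih a3 (by omega) (fun u => g (bn + (bn + u)))]
      conv_rhs => rw [hsplit, List.range_add, List.range_add]
      simp only [List.map_append, List.map_map]
      rw [List.append_assoc]
      congr 1
      · apply List.map_congr_left
        intro t ht
        simp only [List.mem_range] at ht
        exact (congrArg g (snakeSrc_low (show t < bn by omega))).symm
      congr 1
      · apply List.map_congr_left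
        intro u hu
        simp only [List.mem_range] at hu
        simp only [Function.comp_apply]
        apply congrArg
        have ha1bn : a1 = bn := by omega
        rw [ha1bn, snakeSrc_mid hbn (show u < bn by omega)]
        omega
      · apply List.map_congr_left
        intro u hu
        simp only [List.mem_range] at hu
        simp only [Function.comp_apply]
        apply congrArg
        have ha1bn : a1 = bn := by omega
        have ha2bn : a2 = bn := by omega
        rw [ha1bn, ha2bn, snakeSrc_shift hbn]
        have h3 : bn + (bn + a3) - bn - bn = a3 := by omega
        rw [h3]

-- product of two index ranges, flattened, as a single closed-form map
lemma prodRange {α : Type} (A B : Nat) (F : Nat → Nat → α) :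
    (List.range A).flatMap (fun i => (List.range B).map (F i)) =
      (List.range (A * B)).map (fun t => F (t / B) (t % B)) := by
  induction A with
  | zero => simp
  | succ A ih =>
    rcases Nat.eq_zero_or_pos B with hB | hB
    · subst hB; simp
    · rw [List.range_succ, List.flatMap_append, ih, Nat.succ_mul, List.range_add,
        List.map_append, List.flatMap_cons, List.flatMap_nil, List.append_nil, List.map_map]
      congr 1
      apply List.map_congr_left
      intro u hu
      simp only [List.mem_range] at hu
      simp only [Function.comp]
      rw [mul_comm A B, Nat.mul_add_div hB, Nat.mul_add_mod, Nat.div_eq_of_lt hu,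
        Nat.mod_eq_of_lt hu, Nat.add_zero]

lemma rlenB_nonneg (d s : Int) : 0 ≤ rlenB d s := by
  unfold rlenB
  split
  · exact le_refl 0
  · rename_i hd
    rcases eq_or_ne s 0 with hs | hs
    · subst hs
      simp [PySem.Int.floordiv, Int.fdiv_zero]
    · have habs : 0 < |s| := abs_pos.mpr hs
      rw [PySem.Int.floordiv_eq_ediv_of_pos habs]
      apply Int.ediv_nonneg (by omega) (by omega)

-- range(d)[::s] is the closed-form map over range(rlen) of relem
lemma rangeSlice_eq (d s : Int) (hs : s ≠ 0) :
    rangeSlice d s = (List.range (rlenB d s).toNat).map (fun k : Nat => relemB d s (k : Int)) := by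
  rcases lt_trichotomy s 0 with hneg | h0 | hpos
  · unfold rangeSlice
    rw [if_neg (by omega), if_pos hneg]
    simp only [PySem.List.pyRange]
    rw [if_neg hs, if_neg (by omega : ¬ (0:Int) < s)]
    unfold rlenB relemB
    simp only [if_neg (show ¬ (0:Int) < s by omega)]
    by_cases hd : d ≤ 0
    · rw [if_pos hd, if_neg (by omega : ¬ (-1:Int) < d - 1)]
      simp
    · rw [if_neg hd, if_pos (by omega : (-1:Int) < d - 1)]
      have habs : |s| = -s := abs_of_neg hneg
      rw [habs, PySem.Int.floordiv_eq_ediv_of_pos (by omega : (0:Int) < -s)]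
      have he : d - 1 - -1 + -s - 1 = d + -s - 1 := by ring
      rw [he]
      apply List.map_congr_left
      intro k _
      ring
  · exact absurd h0 hs
  · unfold rangeSlice
    rw [if_pos hpos, PySem.List.pyRange_of_pos 0 d hpos]
    unfold rlenB relemB
    simp only [if_pos hpos]
    by_cases hd : d ≤ 0
    · rw [if_pos hd, if_neg (by omega : ¬ (0:Int) < d)]
      simp
    · rw [if_neg hd, if_pos (by omega : (0:Int) < d)]
      have habs : |s| = s := abs_of_pos hpos
      rw [habs, PySem.Int.floordiv_eq_ediv_of_pos hpos]
      have he : d - 0 + s - 1 = d + s - 1 := by ring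
      rw [he]
      apply List.map_congr_left
      intro k _
      ring

-- B's snake source arithmetic over Int equals snakeSrc over Nat
lemma srcInt_eq (bn N t : Nat) (hbn : 1 ≤ bn) (ht : t < N) :
    (if PySem.Int.mod (PySem.Int.floordiv (t : Int) (bn : Int)) 2 = 1
     then PySem.Int.floordiv (t : Int) (bn : Int) * (bn : Int) +
        (min (bn : Int) ((N : Int) - PySem.Int.floordiv (t : Int) (bn : Int) * (bn : Int)) - 1 -
          PySem.Int.mod (t : Int) (bn : Int))
     else (t : Int)) = ((snakeSrc bn N t : Nat) : Int) := by
  have hfd : PySem.Int.floordiv (t : Int) (bn : Int) = ((t / bn : Nat) : Int) :=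
    PySem.Int.floordiv_natCast t bn
  have hmd : PySem.Int.mod (t : Int) (bn : Int) = ((t % bn : Nat) : Int) :=
    PySem.Int.mod_natCast t bn
  have hm2 : PySem.Int.mod ((t / bn : Nat) : Int) 2 = ((t / bn % 2 : Nat) : Int) := by
    exact_mod_cast PySem.Int.mod_natCast (t / bn) 2
  rw [hfd, hmd, hm2]
  have hq : ((t / bn * bn : Nat) : Int) = ((t / bn : Nat) : Int) * ((bn : Nat) : Int) := by
    push_cast; ring
  have h1 : t / bn * bn + t % bn = t := by rw [mul_comm]; exact Nat.div_add_mod t bn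
  have h2 : t % bn < bn := Nat.mod_lt _ (by omega)
  unfold snakeSrc
  by_cases hpar : t / bn % 2 = 1
  · rw [if_pos (by exact_mod_cast hpar), if_neg (by omega)]
    rw [← hq]
    omega
  · rw [if_neg (by exact_mod_cast hpar), if_pos (by omega)]

-- the flattened itertools.product in closed form: one map over a single index range
lemma prod_eq (x xo y yo : Int) (hxo : xo ≠ 0) (hyo : yo ≠ 0) :
    (rangeSlice x xo).flatMap (fun a => (rangeSlice y yo).map (fun b => (a, b))) =
      (List.range ((rlenB x xo).toNat * (rlenB y yo).toNat)).map
        (fun t => (relemB x xo ((t / (rlenB y yo).toNat : Nat) : Int),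
                   relemB y yo ((t % (rlenB y yo).toNat : Nat) : Int))) := by
  rw [rangeSlice_eq x xo hxo, rangeSlice_eq y yo hyo, List.flatMap_map]
  simp only [List.map_map]
  exact prodRange ((rlenB x xo).toNat) ((rlenB y yo).toNat)
    (fun i j => (relemB x xo (i : Int), relemB y yo (j : Int)))

lemma pyRange_prod (x xo y yo : Int) :
    PySem.List.pyRange 0 (rlenB x xo * rlenB y yo) 1 =
      (List.range ((rlenB x xo).toNat * (rlenB y yo).toNat)).map (fun t : Nat => (t : Int)) := by
  rw [PySem.List.pyRange_one]
  have h : rlenB x xo * rlenB y yo - 0 =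
      (((rlenB x xo).toNat * (rlenB y yo).toNat : Nat) : Int) := by
    rw [sub_zero]
    conv_lhs => rw [← Int.toNat_of_nonneg (rlenB_nonneg x xo),
      ← Int.toNat_of_nonneg (rlenB_nonneg y yo)]
    rw [← Nat.cast_mul]
  rw [h, Int.toNat_natCast]
  apply List.map_congr_left
  intro k _
  simp

-- the common core, non-snake orientation: A's flattened product equals B's closed-form map
lemma core_nosnake (x xo y yo : Int) (hxo : xo ≠ 0) (hyo : yo ≠ 0) :
    (rangeSlice x xo).flatMap (fun a => (rangeSlice y yo).map (fun b => (a, b))) =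
      (PySem.List.pyRange 0 (rlenB x xo * rlenB y yo) 1).map (fun t =>
        (relemB x xo (PySem.Int.floordiv t (rlenB y yo)),
         relemB y yo (PySem.Int.mod t (rlenB y yo)))) := by
  rw [prod_eq x xo y yo hxo hyo, pyRange_prod, List.map_map]
  apply List.map_congr_left
  intro t ht
  simp only [List.mem_range] at ht
  have hny : rlenB y yo = (((rlenB y yo).toNat : Nat) : Int) :=
    (Int.toNat_of_nonneg (rlenB_nonneg y yo)).symm
  simp only [Function.comp_apply]
  rw [hny, PySem.Int.floordiv_natCast, PySem.Int.mod_natCast]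
  simp only [Int.toNat_natCast]

-- the common core, snake orientation: flip_lines over the product equals B's snake arithmetic
lemma core_snake (x xo y yo : Int) (hxo : xo ≠ 0) (hyo : yo ≠ 0) (hy : 0 ≤ y) :
    flipLinesA ((rangeSlice x xo).flatMap (fun a => (rangeSlice y yo).map (fun b => (a, b)))) y =
      (PySem.List.pyRange 0 (rlenB x xo * rlenB y yo) 1).map (fun t =>
        (relemB x xo
            (PySem.Int.floordiv
              (if PySem.Int.mod (PySem.Int.floordiv t y) 2 = 1 then
                PySem.Int.floordiv t y * y +
                  (min y (rlenB x xo * rlenB y yo - PySem.Int.floordiv t y * y) - 1 -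
                    PySem.Int.mod t y)
              else t)
              (rlenB y yo)),
          relemB y yo
            (PySem.Int.mod
              (if PySem.Int.mod (PySem.Int.floordiv t y) 2 = 1 then
                PySem.Int.floordiv t y * y +
                  (min y (rlenB x xo * rlenB y yo - PySem.Int.floordiv t y * y) - 1 -
                    PySem.Int.mod t y)
              else t)
              (rlenB y yo)))) := by
  have hnx : rlenB x xo = (((rlenB x xo).toNat : Nat) : Int) :=
    (Int.toNat_of_nonneg (rlenB_nonneg x xo)).symm
  have hny : rlenB y yo = (((rlenB y yo).toNat : Nat) : Int) :=
    (Int.toNat_of_nonneg (rlenB_nonneg y yo)).symm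
  rw [prod_eq x xo y yo hxo hyo, pyRange_prod, List.map_map]
  set NX := (rlenB x xo).toNat with hNX
  set NY := (rlenB y yo).toNat with hNY
  by_cases hy1 : 1 ≤ y
  · have hbn : 1 ≤ y.toNat := by omega
    have hyy : y = ((y.toNat : Nat) : Int) := (Int.toNat_of_nonneg hy).symm
    have hn : rlenB x xo * rlenB y yo = ((NX * NY : Nat) : Int) := by
      rw [hnx, hny, ← Nat.cast_mul]
    rw [hn, hny, hyy, map_snake hbn]
    apply List.map_congr_left
    intro t ht
    simp only [List.mem_range] at ht
    simp only [Function.comp_apply]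
    rw [srcInt_eq y.toNat (NX * NY) t hbn ht, PySem.Int.floordiv_natCast, PySem.Int.mod_natCast]
  · have hy0 : y = 0 := by omega
    have hNY0 : NY = 0 := by
      rw [hNY]
      have : rlenB y yo = 0 := by unfold rlenB; rw [if_pos (by omega)]
      rw [this]
      rfl
    simp [hNY0, flipLinesA_nil]
-- ===== VERDICT (by name: the statement is the Claim_ definition above) =====
theorem block_arranger_py_spec : Claim_equal_block_arranger_py := by
  intro rows columns ro co v s hDom hPre
  obtain ⟨hro, hco, hsn⟩ := hPre
  unfold Spec_block_arranger_py
  cases v with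
  | false =>
    cases s with
    | false =>
      simp only [block_arranger_py, block_arranger_py_alt, Bool.false_eq_true, if_false]
      rw [PySem.List.foldl_append_singleton_eq_map, List.nil_append]
      exact core_nosnake columns co rows ro hco hro
    | true =>
      have hy : (0 : Int) ≤ rows := by simpa using hsn rfl
      simp only [block_arranger_py, block_arranger_py_alt, Bool.false_eq_true, if_false, if_true]
      rw [PySem.List.foldl_append_singleton_eq_map, List.nil_append]
      exact core_snake columns co rows ro hco hro hy
  | true =>
    cases s with
    | false =>
      simp only [block_arranger_py, block_arranger_py_alt, Bool.false_eq_true, if_false, if_true]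
      rw [PySem.List.foldl_append_singleton_eq_map, List.nil_append,
        core_nosnake rows ro columns co hro hco, List.map_map]
      rfl
    | true =>
      have hy : (0 : Int) ≤ columns := by simpa using hsn rfl
      simp only [block_arranger_py, block_arranger_py_alt, if_true]
      rw [PySem.List.foldl_append_singleton_eq_map, List.nil_append,
        core_snake rows ro columns co hro hco hy, List.map_map]
      rfl
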